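-- pv_equiv track=rewrite | github.com/google-research/language | language/tek_representations/preprocess/triviaqa_to_mrqa.py | join_by_double_dash
-- ===== SOURCE A (Python) =====
-- def join_by_double_dash(qid):
--   if '.txt' not in qid:
--     return qid
--   else:
--     question_id = ''
--     underscore_occ = 0
--     for c in qid:
--       question_id += ('--' if c == '_' and underscore_occ == 1 else c)
--       underscore_occ += int(c == '_')
--   return question_id
-- ===== SOURCE B (Python) =====
-- def join_by_double_dash(qid):
--   if '.txt' not in qid:
--     return qid
--   head, sep1, tail = qid.partition('_')
--   mid, sep2, rest = tail.partition('_')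
--   if sep1 and sep2:
--     return head + '_' + mid + '--' + rest
--   return qid
-- ===== Notes on version B (the rewrite author's own statement) =====
-- stated objective: idiomatic
-- what changed: Replaces the char-by-char accumulation loop with an underscore counter by two str.partition calls: split at the first two underscores and rejoin the three pieces, the second separator as a double dash.
import Mathlib
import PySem

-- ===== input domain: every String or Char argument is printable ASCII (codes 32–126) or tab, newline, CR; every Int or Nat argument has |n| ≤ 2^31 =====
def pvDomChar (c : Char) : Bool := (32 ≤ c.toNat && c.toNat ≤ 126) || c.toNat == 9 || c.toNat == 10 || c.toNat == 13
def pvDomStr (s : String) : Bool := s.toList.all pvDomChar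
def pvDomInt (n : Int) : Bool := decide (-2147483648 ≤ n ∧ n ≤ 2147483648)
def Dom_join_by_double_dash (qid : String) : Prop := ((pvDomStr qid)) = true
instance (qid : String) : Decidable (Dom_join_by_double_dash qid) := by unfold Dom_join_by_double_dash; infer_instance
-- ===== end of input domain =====

-- B replaces A's counter-driven char loop by two str.partition splits; objective: idiomatic.

-- ===== PORT A =====
def join_by_double_dash (qid : String) : String :=
  if !(PySem.Str.isIn ".txt" qid) then qid
  else
    let st := qid.toList.foldl
      (fun (st : List Char × Nat) c =>
        (st.1 ++ (if c == '_' && st.2 == 1 then ['-', '-'] else [c]),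
         st.2 + (if c == '_' then 1 else 0)))
      ([], 0)
    String.ofList st.1

-- ===== PORT B =====
-- str.partition('_') ported as (takeWhile (· != '_'), the rest); a nonempty 'sep' piece
-- corresponds to the dropWhile part being nonempty (its head is the '_' separator).
def join_by_double_dash_alt (qid : String) : String :=
  if !(PySem.Str.isIn ".txt" qid) then qid
  else
    let cs := qid.toList
    let head := cs.takeWhile (fun c => c != '_')
    match cs.dropWhile (fun c => c != '_') with
    | [] => qid
    | _ :: tail =>
      let mid := tail.takeWhile (fun c => c != '_')
      match tail.dropWhile (fun c => c != '_') with
      | [] => qid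
      | _ :: rest => String.ofList (head ++ '_' :: (mid ++ '-' :: '-' :: rest))

-- ===== PRECONDITION & SPEC =====
def Spec_join_by_double_dash (qid : String) (out : String) : Prop := out = join_by_double_dash_alt qid
instance (qid : String) (out : String) : Decidable (Spec_join_by_double_dash qid out) := by unfold Spec_join_by_double_dash; infer_instance

-- ===== CLAIM (what is proved, stated in full; the proofs are below) =====
def Claim_equal_join_by_double_dash : Prop := ∀ (qid : String), Dom_join_by_double_dash qid → Spec_join_by_double_dash qid (join_by_double_dash qid)

-- ===== LEMMAS AND PROOFS =====

-- A's loop, as a structural recursion on the remaining characters with the counter.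
def recA : Nat → List Char → List Char
  | _, [] => []
  | occ, c :: t =>
    (if c == '_' && occ == 1 then ['-', '-'] else [c]) ++
      recA (occ + (if c == '_' then 1 else 0)) t

theorem foldA_eq_recA (cs : List Char) (acc : List Char) (occ : Nat) :
    (cs.foldl
      (fun (st : List Char × Nat) c =>
        (st.1 ++ (if c == '_' && st.2 == 1 then ['-', '-'] else [c]),
         st.2 + (if c == '_' then 1 else 0)))
      (acc, occ)).1 = acc ++ recA occ cs := by
  induction cs generalizing acc occ with
  | nil => simp [recA]
  | cons c t ih =>
    simp only [List.foldl_cons, recA]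
    rw [ih, List.append_assoc]

theorem recA_ge_two (cs : List Char) (occ : Nat) (h : 2 ≤ occ) : recA occ cs = cs := by
  induction cs generalizing occ with
  | nil => rfl
  | cons c t ih =>
    have h1 : (occ == 1) = false := by simp; omega
    by_cases hc : c = '_'
    · simp [recA, h1, hc, ih (occ + 1) (by omega)]
    · simp [recA, h1, hc, ih occ (by omega)]

theorem recA_one (cs : List Char) :
    recA 1 cs =
      match cs.dropWhile (fun c => c != '_') with
      | [] => cs
      | _ :: r => cs.takeWhile (fun c => c != '_') ++ '-' :: '-' :: r := by
  induction cs with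
  | nil => rfl
  | cons c t ih =>
    by_cases hc : c = '_'
    · subst hc
      simp [recA, List.dropWhile_cons, recA_ge_two t 2 (by omega)]
    · have hb : (c != '_') = true := by simp [hc]
      cases hdw : t.dropWhile (fun c => c != '_') with
      | nil =>
        simp only [hdw] at ih
        simp [recA, hc, List.dropWhile_cons, hb, hdw, ih]
      | cons x r =>
        simp only [hdw] at ih
        simp [recA, hc, List.dropWhile_cons, List.takeWhile_cons, hb, hdw, ih]

theorem recA_zero (cs : List Char) :
    recA 0 cs =
      match cs.dropWhile (fun c => c != '_') with
      | [] => cs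
      | _ :: r => cs.takeWhile (fun c => c != '_') ++ '_' :: recA 1 r := by
  induction cs with
  | nil => rfl
  | cons c t ih =>
    by_cases hc : c = '_'
    · subst hc
      simp [recA, List.dropWhile_cons]
    · have hb : (c != '_') = true := by simp [hc]
      cases hdw : t.dropWhile (fun c => c != '_') with
      | nil =>
        simp only [hdw] at ih
        simp [recA, hc, List.dropWhile_cons, hb, hdw, ih]
      | cons x r =>
        simp only [hdw] at ih
        simp [recA, hc, List.dropWhile_cons, List.takeWhile_cons, hb, hdw, ih]

-- ===== VERDICT (by name: the statement is the Claim_ definition above) =====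
theorem join_by_double_dash_spec : Claim_equal_join_by_double_dash := by
  intro qid _
  unfold Spec_join_by_double_dash join_by_double_dash join_by_double_dash_alt
  by_cases hin : PySem.Str.isIn ".txt" qid = true
  · rw [hin]
    simp only [Bool.not_true, Bool.false_eq_true, reduceIte]
    rw [foldA_eq_recA, List.nil_append, recA_zero]
    cases h1 : qid.toList.dropWhile (fun c => c != '_') with
    | nil => simp [String.ofList]
    | cons x tail =>
      simp only []
      rw [recA_one]
      cases h2 : tail.dropWhile (fun c => c != '_') with
      | nil =>
        simp only []
        have hx : x = '_' := by
          have := List.head_dropWhile_not (p := fun c => c != '_') (l := qid.toList)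
            (by simp [h1])
          simpa [h1] using this
        have heq : qid.toList.takeWhile (fun c => c != '_') ++ '_' :: tail = qid.toList := by
          conv_rhs => rw [← List.takeWhile_append_dropWhile (p := fun c => c != '_') (l := qid.toList)]
          rw [h1, hx]
        rw [heq]
        simp [String.ofList]
      | cons y rest => simp
  · rw [Bool.not_eq_true] at hin
    rw [hin]
    simp only [Bool.not_false, reduceIte]
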